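-- pv_equiv track=rewrite | github.com/donghyun-98/Code-Kata-SQL-Python- | 프로그래머스/2/138476. 귤 고르기/귤 고르기.py | solution
-- ===== SOURCE A (Python) =====
-- def solution(k, tangerine):
--     tangerine_count = {}
--
--     # 귤의 갯수를 세서 딕셔너리 형태로 저장하고
--     for i in tangerine:
--         if i not in tangerine_count:
--             tangerine_count[i] = 1
--         else:
--             tangerine_count[i] += 1
--
--     # 내림차순으로 정렬해 갯수가 많은 귤부터 담을 수 있도록 한다.
--     sorted_count = sorted(tangerine_count.values(), reverse=True)
--
--     # 최소한의 종류로 k 개를 채우기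
--     cnt = 0
--     for i in sorted_count:
--         k -= i
--         cnt += 1
--
--         if k <= 0:
--             break
--
--     return cnt
-- ===== SOURCE B (Python) =====
-- from collections import Counter
-- from itertools import accumulate
-- from bisect import bisect_left
--
--
-- def solution(k, tangerine):
--     counts = sorted(Counter(tangerine).values(), reverse=True)
--     prefix = list(accumulate(counts))
--     i = bisect_left(prefix, k)
--     return min(i + 1, len(counts))
-- ===== Notes on version B (the rewrite author's own statement) =====
-- stated objective: alternative
-- what changed: Replaces A's hand-rolled dict counting and early-breaking greedy subtraction loop by Counter + a prefix-sum table (itertools.accumulate) and a binary search (bisect_left) for the first prefix sum reaching k, clamped to the number of types.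
import Mathlib
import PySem

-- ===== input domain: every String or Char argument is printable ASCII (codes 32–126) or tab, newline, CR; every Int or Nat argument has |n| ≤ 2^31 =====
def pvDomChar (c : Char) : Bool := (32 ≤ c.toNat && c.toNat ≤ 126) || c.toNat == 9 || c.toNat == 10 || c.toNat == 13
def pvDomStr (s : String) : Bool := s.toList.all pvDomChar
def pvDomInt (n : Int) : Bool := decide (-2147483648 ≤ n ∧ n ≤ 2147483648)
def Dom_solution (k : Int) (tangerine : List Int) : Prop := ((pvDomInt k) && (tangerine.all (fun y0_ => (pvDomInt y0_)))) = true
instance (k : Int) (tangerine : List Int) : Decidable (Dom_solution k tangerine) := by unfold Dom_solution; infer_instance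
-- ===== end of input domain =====

-- B replaces A's early-breaking greedy scan by a prefix-sum table plus binary search (bisect_left); objective: alternative decomposition.

-- ===== PORT A =====
-- the `for i in sorted_count: k -= i; cnt += 1; if k <= 0: break` loop
def solutionLoop (k : Int) (cnt : Int) : List Int → Int
  | [] => cnt
  | i :: rest => if k - i ≤ 0 then cnt + 1 else solutionLoop (k - i) (cnt + 1) rest

def solution (k : Int) (tangerine : List Int) : Int :=
  let tangerine_count := tangerine.foldl
    (fun d i => if d.contains i = false then d.insert i 1 else d.modify i 0 (· + 1))
    PySem.Dict.empty
  let sorted_count := PySem.List.sorted tangerine_count.values (fun x => x) true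
  solutionLoop k 0 sorted_count

-- ===== PORT B =====
-- itertools.accumulate(counts): running sums (acc is the sum so far)
def accumFrom (acc : Int) : List Int → List Int
  | [] => []
  | c :: rest => (acc + c) :: accumFrom (acc + c) rest

def solution_alt (k : Int) (tangerine : List Int) : Int :=
  let counts := PySem.List.sorted (PySem.Dict.counter tangerine).values (fun x => x) true
  let prefixSums := accumFrom 0 counts
  let i := PySem.List.bisectLeft prefixSums k
  min ((i : Int) + 1) ((counts.length : Int))

-- ===== PRECONDITION & SPEC =====
def Spec_solution (k : Int) (tangerine : List Int) (out : Int) : Prop := out = solution_alt k tangerine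
instance (k : Int) (tangerine : List Int) (out : Int) : Decidable (Spec_solution k tangerine out) := by unfold Spec_solution; infer_instance

-- ===== CLAIM (what is proved, stated in full; the proofs are below) =====
def Claim_equal_solution : Prop := ∀ (k : Int) (tangerine : List Int), Dom_solution k tangerine → Spec_solution k tangerine (solution k tangerine)

-- ===== LEMMAS AND PROOFS =====

-- A's insert-or-increment step is exactly Counter's modify step
lemma stepA_eq_modify (d : PySem.Dict Int Int) (i : Int) :
    (if d.contains i = false then d.insert i 1 else d.modify i 0 (· + 1)) = d.modify i 0 (· + 1) := by
  by_cases h : d.contains i = false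
  · rw [if_pos h]
    simp only [PySem.Dict.modify, PySem.Dict.getD_of_not_contains (h := h)]
    norm_num
  · simp [h]

lemma dictA_eq_counter (tangerine : List Int) :
    tangerine.foldl
      (fun d i => if d.contains i = false then d.insert i 1 else d.modify i 0 (· + 1))
      PySem.Dict.empty = PySem.Dict.counter tangerine := by
  rw [PySem.Dict.counter_eq_foldl]
  suffices h : ∀ (d : PySem.Dict Int Int),
      tangerine.foldl (fun d i => if d.contains i = false then d.insert i 1 else d.modify i 0 (· + 1)) d
        = tangerine.foldl (fun d x => d.modify x 0 (· + 1)) d from h _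
  induction tangerine with
  | nil => intro d; rfl
  | cons i rest ih => intro d; rw [List.foldl_cons, List.foldl_cons, stepA_eq_modify]; exact ih _

-- every count of the Counter is at least 1
lemma counts_pos (tangerine : List Int) (x : Int)
    (hx : x ∈ PySem.List.sorted (PySem.Dict.counter tangerine).values (fun x => x) true) : 1 ≤ x := by
  rw [PySem.List.mem_sorted] at hx
  have hv : x ∈ (PySem.Dict.counter tangerine).items.map (·.2) := hx
  rw [PySem.Dict.items_counter] at hv
  simp only [List.map_map, List.mem_map] at hv
  obtain ⟨c, hc, hcx⟩ := hv
  rw [PySem.Set.mem_ofList] at hc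
  have : 0 < tangerine.count c := List.count_pos_iff.mpr hc
  simp only [Function.comp] at hcx
  omega

lemma accumFrom_length (a : Int) (l : List Int) : (accumFrom a l).length = l.length := by
  induction l generalizing a with
  | nil => rfl
  | cons c rest ih => simp [accumFrom, ih]

lemma le_of_mem_accumFrom (a : Int) (l : List Int) (h : ∀ x ∈ l, 0 ≤ x) :
    ∀ y ∈ accumFrom a l, a ≤ y := by
  induction l generalizing a with
  | nil => simp [accumFrom]
  | cons c rest ih =>
    intro y hy
    have hc : 0 ≤ c := h c (by simp)
    rcases List.mem_cons.mp hy with rfl | hy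
    · omega
    · have := ih (a + c) (fun x hx => h x (by simp [hx])) y hy
      omega

lemma accumFrom_pairwise (l : List Int) (h : ∀ x ∈ l, 0 ≤ x) (a : Int) :
    (accumFrom a l).Pairwise (· ≤ ·) := by
  induction l generalizing a with
  | nil => simp [accumFrom]
  | cons c rest ih =>
    refine List.Pairwise.cons ?_ (ih (fun x hx => h x (by simp [hx])) (a + c))
    exact le_of_mem_accumFrom (a + c) rest (fun x hx => h x (by simp [hx]))

-- proof-side recursion computing the greedy break point
def tw (k : Int) : List Int → Nat
  | [] => 0
  | c :: rest => if c < k then tw (k - c) rest + 1 else 0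

lemma tw_le (k : Int) (l : List Int) : tw k l ≤ l.length := by
  induction l generalizing k with
  | nil => simp [tw]
  | cons c rest ih =>
    simp only [tw, List.length_cons]
    split_ifs
    · exact Nat.succ_le_succ (ih _)
    · omega

-- tw is exactly the first index whose prefix sum reaches k
lemma accumFrom_shift (c : Int) (l : List Int) : ∀ (a : Int),
    accumFrom (a + c) l = (accumFrom a l).map (c + ·) := by
  induction l with
  | nil => intro a; rfl
  | cons d t iht =>
    intro a
    simp only [accumFrom, List.map_cons, List.cons.injEq]
    refine ⟨by omega, ?_⟩
    rw [show a + c + d = a + d + c by omega, iht (a + d)]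

lemma tw_char (l : List Int) (hpos : ∀ x ∈ l, 1 ≤ x) (k : Int) :
    ∀ j (hj : j < l.length), ((accumFrom 0 l)[j]'(by rw [accumFrom_length]; exact hj) < k ↔ j < tw k l) := by
  induction l generalizing k with
  | nil => intro j hj; simp at hj
  | cons c rest ih =>
    intro j hj
    have hrest : ∀ x ∈ rest, 1 ≤ x := fun x hx => hpos x (by simp [hx])
    have hshift : accumFrom (0 + c) rest = (accumFrom 0 rest).map (c + ·) := accumFrom_shift c rest 0
    by_cases hck : c < k
    · match j with
      | 0 => simp [accumFrom, tw, hck]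
      | j' + 1 =>
        have hj' : j' < rest.length := by simpa using hj
        have hiff := ih hrest (k - c) j' hj'
        simp only [accumFrom, hshift, List.getElem_cons_succ, List.getElem_map, tw, if_pos hck]
        omega
    · match j with
      | 0 => simp [accumFrom, tw, hck]
      | j' + 1 =>
        have hj' : j' < rest.length := by simpa using hj
        have hlen : j' < (accumFrom 0 rest).length := by rw [accumFrom_length]; exact hj'
        have h0 : (0 : Int) ≤ (accumFrom 0 rest)[j'] :=
          le_of_mem_accumFrom 0 rest (fun x hx => by have := hrest x hx; omega) _ (List.getElem_mem hlen)
        simp only [accumFrom, hshift, List.getElem_cons_succ, List.getElem_map, tw, if_neg hck]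
        omega

lemma tw_eq_bisect (l : List Int) (hpos : ∀ x ∈ l, 1 ≤ x) (k : Int) :
    tw k l = PySem.List.bisectLeft (accumFrom 0 l) k := by
  have hpw : (accumFrom 0 l).Pairwise (· ≤ ·) :=
    accumFrom_pairwise l (fun x hx => by have := hpos x hx; omega) 0
  obtain ⟨hle, hlt, hge⟩ := PySem.List.bisectLeft_spec (accumFrom 0 l) k hpw
  rw [accumFrom_length] at hle
  set t := PySem.List.bisectLeft (accumFrom 0 l) k with ht
  have htw := tw_le k l
  rcases Nat.lt_trichotomy (tw k l) t with h | h | h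
  · -- p[tw] < k by bisect, but tw_char says ¬(p[tw] < k)
    have hlen : tw k l < l.length := lt_of_lt_of_le h hle
    have h1 := hlt (tw k l) (by rw [accumFrom_length]; exact hlen) h
    have h2 := (tw_char l hpos k (tw k l) hlen)
    omega
  · exact h
  · have hlen : t < l.length := lt_of_lt_of_le h htw
    have h1 := hge t (by rw [accumFrom_length]; exact hlen) (le_refl t)
    have h2 := (tw_char l hpos k t hlen).mpr h
    omega

lemma loop_eq_min (l : List Int) : ∀ (k cnt : Int),
    solutionLoop k cnt l = cnt + min ((tw k l : Int) + 1) ((l.length : Int)) := by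
  induction l with
  | nil => intro k cnt; simp [solutionLoop, tw]
  | cons c rest ih =>
    intro k cnt
    by_cases h : k - c ≤ 0
    · have hck : ¬ c < k := by omega
      simp only [solutionLoop, if_pos h, tw, if_neg hck, List.length_cons]
      push_cast
      omega
    · have hck : c < k := by omega
      simp only [solutionLoop, if_neg h, tw, if_pos hck, List.length_cons, ih (k - c) (cnt + 1)]
      push_cast
      omega

-- ===== VERDICT (by name: the statement is the Claim_ definition above) =====
theorem solution_spec : Claim_equal_solution := by
  intro k tangerine _
  simp only [Spec_solution, solution, solution_alt]
  rw [dictA_eq_counter, loop_eq_min, tw_eq_bisect _ (counts_pos tangerine) k]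
  omega
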